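-- pv_equiv track=rewrite | github.com/PeihanDou/Leetcode-NowCoder-Practice | cyc_note_17.py | print1ToMaxOfNDigits
-- ===== SOURCE A (Python) =====
-- def print1ToMaxOfNDigits(n):
--     res = ['']
--     ans = []
--     while n > 0:
--         res = combine(res)
--         ans += res
--         n -= 1
--     return ans
--
-- def combine(l):
--     new_l = []
--     digits = [str(i) for i in range(10)]
--     for i in l:
--         for d in digits:
--             if i != '0':
--                 new_l.append(i+d)
--     return new_l
-- ===== SOURCE B (Python) =====
-- def print1ToMaxOfNDigits(n):
--     # Enumerate the numbers directly: length 1 is 0..9, length k >= 2 is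
--     # the k-digit numbers 10**(k-1) .. 10**k - 1, stringified in order.
--     ans = [str(i) for i in range(10)] if n > 0 else []
--     lo = 10
--     for _ in range(2, n + 1):
--         ans += [str(i) for i in range(lo, lo * 10)]
--         lo *= 10
--     return ans
-- ===== Notes on version B (the rewrite author's own statement) =====
-- stated objective: alternative
-- what changed: Instead of repeatedly recombining the previous level's strings with every digit character (filtering out '0' on each pass), B enumerates the integer ranges 0..9 and 10**(k-1)..10**k-1 for each length k and stringifies each number directly.
import Mathlib
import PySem

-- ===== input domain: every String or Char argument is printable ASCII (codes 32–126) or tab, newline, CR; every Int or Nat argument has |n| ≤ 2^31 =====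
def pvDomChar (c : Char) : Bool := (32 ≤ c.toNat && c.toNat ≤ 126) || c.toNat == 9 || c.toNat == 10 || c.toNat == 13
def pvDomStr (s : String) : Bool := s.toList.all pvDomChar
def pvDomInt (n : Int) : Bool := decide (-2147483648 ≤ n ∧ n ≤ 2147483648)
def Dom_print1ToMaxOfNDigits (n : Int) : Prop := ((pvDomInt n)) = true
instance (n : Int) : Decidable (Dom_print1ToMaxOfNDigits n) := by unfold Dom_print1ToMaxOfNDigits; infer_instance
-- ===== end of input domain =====

-- B enumerates the integer ranges 0..9 and 10^(k-1)..10^k-1 per length k and stringifies each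
-- number directly, instead of A's level-by-level string recombination; alternative decomposition.

-- ===== PORT A =====
-- combine(l): new_l = []; for i in l: for d in [str(0)..str(9)]: if i != '0': new_l.append(i+d)
def combinePy (l : List String) : List String :=
  let digits := (PySem.List.pyRange 0 10 1).map PySem.Int.toStr
  l.foldl (fun newL i => digits.foldl (fun nl d => if i ≠ "0" then nl ++ [i ++ d] else nl) newL) []

-- while n > 0: res = combine(res); ans += res; n -= 1
def print1ToMaxLoop (n : Int) (res ans : List String) : List String :=
  if 0 < n then
    let r := combinePy res
    print1ToMaxLoop (n - 1) r (ans ++ r)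
  else ans
termination_by n.toNat
decreasing_by omega

def print1ToMaxOfNDigits (n : Int) : List String :=
  print1ToMaxLoop n [""] []

-- ===== PORT B =====
-- ans = [str(i) for i in range(10)] if n > 0 else []
-- lo = 10
-- for _ in range(2, n+1): ans += [str(i) for i in range(lo, lo*10)]; lo *= 10
def print1ToMaxOfNDigits_alt (n : Int) : List String :=
  let ans := if 0 < n then (PySem.List.pyRange 0 10 1).map PySem.Int.toStr else []
  ((PySem.List.pyRange 2 (n + 1) 1).foldl
      (fun st _ => (st.1 ++ (PySem.List.pyRange st.2 (st.2 * 10) 1).map PySem.Int.toStr, st.2 * 10))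
      (ans, 10)).1

-- ===== PRECONDITION & SPEC =====
def Spec_print1ToMaxOfNDigits (n : Int) (out : List String) : Prop := out = print1ToMaxOfNDigits_alt n
instance (n : Int) (out : List String) : Decidable (Spec_print1ToMaxOfNDigits n out) := by unfold Spec_print1ToMaxOfNDigits; infer_instance

-- ===== CLAIM (what is proved, stated in full; the proofs are below) =====
def Claim_equal_print1ToMaxOfNDigits : Prop := ∀ (n : Int), Dom_print1ToMaxOfNDigits n → Spec_print1ToMaxOfNDigits n (print1ToMaxOfNDigits n)

-- ===== LEMMAS AND PROOFS =====

-- Facts about Nat.toDigits (decimal printing): fuel shift, fuel irrelevance, one-digit step.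
theorem tdc_shift : ∀ (f n : Nat) (l : List Char),
    Nat.toDigitsCore 10 f n l = Nat.toDigitsCore 10 f n [] ++ l := by
  intro f
  induction f with
  | zero => intro n l; simp [Nat.toDigitsCore]
  | succ f ih =>
    intro n l
    simp only [Nat.toDigitsCore]
    by_cases h : n / 10 = 0
    · simp [h]
    · simp only [h, if_false]
      rw [ih (n/10) (_ :: l), ih (n/10) [_]]
      simp

theorem tdc_fuel : ∀ (f : Nat), ∀ (n f' : Nat) (l : List Char), n < f → n < f' →
    Nat.toDigitsCore 10 f n l = Nat.toDigitsCore 10 f' n l := by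
  intro f
  induction f with
  | zero => omega
  | succ f ih =>
    intro n f' l h1 h2
    cases f' with
    | zero => omega
    | succ f' =>
      simp only [Nat.toDigitsCore]
      by_cases h : n / 10 = 0
      · simp [h]
      · simp only [h, if_false]
        exact ih (n/10) f' _ (by omega) (by omega)

theorem toDigits_step (n d : Nat) (hn : 1 ≤ n) (hd : d < 10) :
    Nat.toDigits 10 (10 * n + d) = Nat.toDigits 10 n ++ [Nat.digitChar d] := by
  unfold Nat.toDigits
  have h10 : (10 * n + d) / 10 = n := by omega
  have hm : (10 * n + d) % 10 = d := by omega
  simp only [Nat.toDigitsCore, h10, hm]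
  rw [if_neg (by omega)]
  rw [tdc_shift, tdc_fuel (10*n+d) n (n+1) [] (by omega) (by omega)]
  simp only [Nat.toDigitsCore]

theorem toDigits_small (k : Nat) (h : k < 10) :
    Nat.toDigits 10 k = [Nat.digitChar k] := by
  unfold Nat.toDigits
  simp only [Nat.toDigitsCore]
  rw [if_pos (by omega), Nat.mod_eq_of_lt h]

theorem toDigits_nonempty (n : Nat) : Nat.toDigits 10 n ≠ [] := by
  unfold Nat.toDigits
  simp only [Nat.toDigitsCore]
  by_cases h : n / 10 = 0
  · simp [h]
  · simp only [h, if_false]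
    rw [tdc_shift]; simp

theorem toDigits_ne_zero_char (n : Nat) (hn : 1 ≤ n) : Nat.toDigits 10 n ≠ ['0'] := by
  by_cases h : n < 10
  · interval_cases n <;> decide
  · have hs := toDigits_step (n/10) (n%10) (by omega) (by omega)
    rw [show 10 * (n/10) + n % 10 = n by omega] at hs
    rw [hs]
    have hne := toDigits_nonempty (n/10)
    intro hc
    cases h' : Nat.toDigits 10 (n/10) with
    | nil => exact hne h'
    | cons c t => rw [h'] at hc; simp at hc

-- Lift to PySem.Int.toStr.
theorem toChars_nonneg (m : Int) (h : 0 ≤ m) :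
    PySem.Int.toChars m = Nat.toDigits 10 m.toNat := by
  simp [PySem.Int.toChars, not_lt.mpr h]

theorem toStr_step (m d : Int) (hm : 1 ≤ m) (hd0 : 0 ≤ d) (hd : d < 10) :
    PySem.Int.toStr (10 * m + d) = PySem.Int.toStr m ++ PySem.Int.toStr d := by
  have h1 : PySem.Int.toChars (10 * m + d) = PySem.Int.toChars m ++ PySem.Int.toChars d := by
    rw [toChars_nonneg _ (by omega), toChars_nonneg _ (by omega), toChars_nonneg _ hd0]
    rw [show (10 * m + d).toNat = 10 * m.toNat + d.toNat by omega]
    rw [toDigits_step m.toNat d.toNat (by omega) (by omega),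
        toDigits_small d.toNat (by omega)]
  simp [PySem.Int.toStr, h1, String.ofList_append]

theorem toStr_ne_zero (m : Int) (hm : 1 ≤ m) : PySem.Int.toStr m ≠ "0" := by
  intro h
  have h2 : PySem.Int.toChars m = ['0'] := by
    rw [← PySem.Int.toList_toStr, h]; decide
  rw [toChars_nonneg m (by omega)] at h2
  exact toDigits_ne_zero_char m.toNat (by omega) h2

-- Facts about A's combine.
theorem combinePy_cons_zero (L : List String) : combinePy ("0" :: L) = combinePy L := by
  simp [combinePy]

theorem combine_map (R : List Int) (hR : ∀ m ∈ R, 1 ≤ m) :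
    combinePy (R.map PySem.Int.toStr) =
      R.flatMap (fun m => ((PySem.List.pyRange 0 10 1).map PySem.Int.toStr).map (PySem.Int.toStr m ++ ·)) := by
  unfold combinePy
  rw [List.foldl_map]
  rw [PySem.List.foldl_congr_mem _ _
      (fun acc m => acc ++ ((PySem.List.pyRange 0 10 1).map PySem.Int.toStr).map (PySem.Int.toStr m ++ ·)) _
      (by
        intro acc m hmem
        have hne : PySem.Int.toStr m ≠ "0" := toStr_ne_zero m (hR m hmem)
        rw [PySem.List.foldl_congr_mem _ _
            (fun nl d => nl ++ [(PySem.Int.toStr m ++ ·) d]) _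
            (by intro nl d _; rw [if_pos hne])]
        rw [PySem.List.foldl_append_singleton_eq_map])]
  rw [PySem.List.foldl_append_eq_flatMap]
  simp

theorem block_eq (m : Int) (hm : 1 ≤ m) :
    ((PySem.List.pyRange 0 10 1).map PySem.Int.toStr).map (PySem.Int.toStr m ++ ·) =
      (PySem.List.pyRange (10 * m) (10 * m + 10) 1).map PySem.Int.toStr := by
  rw [PySem.List.pyRange_one 0 10, PySem.List.pyRange_one (10 * m) (10 * m + 10)]
  simp only [List.map_map]
  rw [show ((10:Int) - 0).toNat = 10 by decide,
      show ((10 * m + 10) - 10 * m).toNat = 10 by omega]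
  apply List.map_congr_left
  intro k hk
  have hk10 : k < 10 := List.mem_range.mp hk
  simp only [Function.comp]
  rw [show (0:Int) + (k:Int) = (k:Int) by ring]
  rw [← toStr_step m (k:Int) hm (by omega) (by exact_mod_cast hk10)]

theorem range_flatMap (a b : Int) :
    (PySem.List.pyRange a b 1).flatMap
        (fun m => (PySem.List.pyRange (10 * m) (10 * m + 10) 1).map PySem.Int.toStr) =
      (PySem.List.pyRange (10 * a) (10 * b) 1).map PySem.Int.toStr := by
  by_cases hab : b ≤ a
  · rw [PySem.List.pyRange_one_eq_nil hab, PySem.List.pyRange_one_eq_nil (by omega)]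
    simp
  · rw [not_le] at hab
    have hk : ∃ k : Nat, (b - a).toNat = k := ⟨(b - a).toNat, rfl⟩
    obtain ⟨k, hk⟩ := hk
    induction k generalizing a with
    | zero => omega
    | succ k ih =>
      rw [PySem.List.pyRange_one_cons hab]
      rw [List.flatMap_cons]
      rw [PySem.List.pyRange_one_append (10 * a) (10 * a + 10) (10 * b) (by omega) (by omega)]
      rw [List.map_append]
      congr 1
      by_cases h2 : b ≤ a + 1
      · rw [PySem.List.pyRange_one_eq_nil h2, PySem.List.pyRange_one_eq_nil (by omega)]
        simp
      · have := ih (a + 1) (by omega) (by omega)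
        rw [show 10 * (a + 1) = 10 * a + 10 by ring] at this
        exact this

theorem combine_range (a b : Int) (ha : 1 ≤ a) :
    combinePy ((PySem.List.pyRange a b 1).map PySem.Int.toStr) =
      (PySem.List.pyRange (10 * a) (10 * b) 1).map PySem.Int.toStr := by
  rw [combine_map _ (by intro m hm; have := (PySem.List.mem_pyRange_one).mp hm; omega)]
  rw [← range_flatMap a b]
  apply List.flatMap_congr  -- congruence over members
  intro m hm
  have := (PySem.List.mem_pyRange_one).mp hm
  exact block_eq m (by omega)

theorem combine_first : combinePy [""] = (PySem.List.pyRange 0 10 1).map PySem.Int.toStr := by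
  decide

-- The levels produced from a lower bound lo: chunk k is the strings of range(lo*10^k, lo*10^(k+1)).
def chunks (lo : Int) : Nat → List String
  | 0 => []
  | k + 1 => (PySem.List.pyRange lo (lo * 10) 1).map PySem.Int.toStr ++ chunks (lo * 10) k

theorem loopA_spec : ∀ (k : Nat) (a : Int) (ans : List String), 1 ≤ a →
    print1ToMaxLoop (k : Int) ((PySem.List.pyRange a (a * 10) 1).map PySem.Int.toStr) ans =
      ans ++ chunks (a * 10) k := by
  intro k
  induction k with
  | zero => intro a ans _; rw [print1ToMaxLoop]; simp [chunks]
  | succ k ih =>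
    intro a ans ha
    rw [print1ToMaxLoop]
    rw [if_pos (show (0:Int) < ((k+1 : Nat) : Int) by push_cast; omega)]
    have hc : combinePy ((PySem.List.pyRange a (a * 10) 1).map PySem.Int.toStr) =
        (PySem.List.pyRange (a * 10) ((a * 10) * 10) 1).map PySem.Int.toStr := by
      rw [combine_range a (a * 10) ha]
      rw [show 10 * a = a * 10 by ring, show 10 * (a * 10) = a * 10 * 10 by ring]
    simp only [hc]
    rw [show ((k + 1 : Nat) : Int) - 1 = ((k : Nat) : Int) by push_cast; ring]
    rw [ih (a * 10) _ (by omega)]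
    simp [chunks]

theorem foldB_spec : ∀ (l : List Int) (acc : List String) (lo : Int),
    (l.foldl
        (fun (st : List String × Int) _ =>
          (st.1 ++ (PySem.List.pyRange st.2 (st.2 * 10) 1).map PySem.Int.toStr, st.2 * 10))
        (acc, lo)).1 = acc ++ chunks lo l.length := by
  intro l
  induction l with
  | nil => intro acc lo; simp [chunks]
  | cons x t ih =>
    intro acc lo
    simp only [List.foldl_cons, List.length_cons]
    rw [ih]
    simp [chunks]

-- ===== VERDICT (by name: the statement is the Claim_ definition above) =====
theorem print1ToMaxOfNDigits_spec : Claim_equal_print1ToMaxOfNDigits := by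
  intro n _
  unfold Spec_print1ToMaxOfNDigits print1ToMaxOfNDigits print1ToMaxOfNDigits_alt
  by_cases hn : 0 < n
  · rw [print1ToMaxLoop, if_pos hn]
    simp only [combine_first, if_pos hn, List.nil_append]
    by_cases h1 : n = 1
    · subst h1
      rw [show (1:Int) - 1 = 0 from rfl]
      rw [print1ToMaxLoop, if_neg (by decide : ¬ (0:Int) < 0)]
      rw [PySem.List.pyRange_one_eq_nil (a := 2) (b := 1 + 1) (by norm_num)]
      simp
    · -- n ≥ 2
      have hn2 : 2 ≤ n := by omega
      rw [print1ToMaxLoop, if_pos (by omega)]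
      have hsplit : (PySem.List.pyRange 0 10 1).map PySem.Int.toStr =
          "0" :: (PySem.List.pyRange 1 10 1).map PySem.Int.toStr := by
        rw [PySem.List.pyRange_one_cons (by norm_num : (0:Int) < 10)]
        simp only [List.map_cons]
        rw [show PySem.Int.toStr 0 = "0" from rfl]
        norm_num
      have hc2 : combinePy ((PySem.List.pyRange 0 10 1).map PySem.Int.toStr) =
          (PySem.List.pyRange 10 (10 * 10) 1).map PySem.Int.toStr := by
        rw [hsplit, combinePy_cons_zero, combine_range 1 10 (by norm_num)]
        norm_num
      simp only [hc2]
      rw [show n - 1 - 1 = (((n - 2).toNat : Nat) : Int) by omega]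
      rw [show (10 : Int) * 10 = 10 * 10 from rfl]
      rw [loopA_spec (n - 2).toNat 10 _ (by norm_num)]
      rw [foldB_spec]
      rw [PySem.List.length_pyRange_one]
      rw [show ((n + 1) - 2).toNat = (n - 2).toNat + 1 by omega]
      simp [chunks]
  · rw [print1ToMaxLoop, if_neg hn]
    rw [if_neg hn]
    rw [PySem.List.pyRange_one_eq_nil (a := 2) (b := n + 1) (by omega)]
    simp
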